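-- pv_equiv track=rewrite | github.com/Morfinic/PWR-VI-KZW | Lab1_py/sortRPQ.py | sort123
-- ===== SOURCE A (Python) =====
-- def sort123(procList: list):
--     t: int = 0
--     Cmax: int = 0
--
--     for proc in procList:
--         t = max(t, proc[0])
--         t += proc[1]
--         Cmax = max(Cmax, t + proc[2])
--
--     return Cmax
-- ===== SOURCE B (Python) =====
-- def sort123(procList: list):
--     # For each job i, compute its completion time directly from the closed-form
--     # characterization: the machine runs without idle time from its last "start
--     # point" -- either time 0 or the release of some earlier job j <= i.  The
--     # makespan is the largest completion time plus that job's delivery time.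
--     best = 0
--     prev = []  # jobs scheduled before the current one, most recent first
--     for proc in procList:
--         s = proc[1]          # processing time of the block j..i, scanning back
--         c = proc[0] + s      # start point: release of the current job
--         for job in prev:
--             s += job[1]
--             c = max(c, job[0] + s)   # start point: release of job j
--         c = max(c, s)                # start point: time 0
--         best = max(best, c + proc[2])
--         prev.insert(0, proc)
--     return best
-- ===== Notes on version B (the rewrite author's own statement) =====
-- stated objective: alternative
-- what changed: B drops A's streaming recurrence entirely: for each job it recomputes the completion time from scratch as the maximum over all possible start points (time 0 or an earlier job's release) by scanning the already-scheduled jobs backwards, an O(n^2) direct evaluation of the closed-form characterization instead of A's O(n) carried state t.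
import Mathlib
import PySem

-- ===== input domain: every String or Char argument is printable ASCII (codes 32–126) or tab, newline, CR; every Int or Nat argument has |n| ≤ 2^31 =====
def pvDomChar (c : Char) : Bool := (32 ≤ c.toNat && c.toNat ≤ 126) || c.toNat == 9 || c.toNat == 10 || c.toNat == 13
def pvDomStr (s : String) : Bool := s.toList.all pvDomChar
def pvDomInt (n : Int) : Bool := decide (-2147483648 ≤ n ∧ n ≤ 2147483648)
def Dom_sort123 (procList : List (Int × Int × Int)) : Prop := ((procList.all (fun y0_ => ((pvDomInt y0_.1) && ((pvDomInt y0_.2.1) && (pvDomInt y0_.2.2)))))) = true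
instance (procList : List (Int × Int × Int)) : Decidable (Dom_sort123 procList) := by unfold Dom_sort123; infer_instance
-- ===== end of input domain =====

-- B recomputes each job's completion time from scratch as a max over all possible start
-- points (time 0 or an earlier release), scanning the scheduled prefix backwards — an
-- O(n^2) direct evaluation instead of A's O(n) carried recurrence; objective: alternative.

-- ===== PORT A =====
def sort123 (procList : List (Int × Int × Int)) : Int :=
  (procList.foldl
    (fun (s : Int × Int) proc =>
      let t := max s.1 proc.1 + proc.2.1
      (t, max s.2 (t + proc.2.2)))
    (0, 0)).2

-- ===== PORT B =====
-- inner loop of Source B: scan the reversed prefix, state (s, c)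
def pvScan (s c : Int) (prev : List (Int × Int × Int)) : Int × Int :=
  prev.foldl
    (fun (p : Int × Int) job =>
      let s' := p.1 + job.2.1
      (s', max p.2 (job.1 + s')))
    (s, c)

def sort123_alt (procList : List (Int × Int × Int)) : Int :=
  (procList.foldl
    (fun (st : Int × List (Int × Int × Int)) proc =>
      let sc := pvScan proc.2.1 (proc.1 + proc.2.1) st.2
      let c := max sc.2 sc.1
      (max st.1 (c + proc.2.2), proc :: st.2))
    (0, [])).1

-- ===== PRECONDITION & SPEC =====
def Spec_sort123 (procList : List (Int × Int × Int)) (out : Int) : Prop := out = sort123_alt procList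
instance (procList : List (Int × Int × Int)) (out : Int) : Decidable (Spec_sort123 procList out) := by unfold Spec_sort123; infer_instance

-- ===== CLAIM (what is proved, stated in full; the proofs are below) =====
def Claim_equal_sort123 : Prop := ∀ (procList : List (Int × Int × Int)), Dom_sort123 procList → Spec_sort123 procList (sort123 procList)

-- ===== LEMMAS AND PROOFS =====

-- A's running completion time t as a function of the reversed processed prefix
def pvT : List (Int × Int × Int) → Int
  | [] => 0
  | proc :: R => max (pvT R) proc.1 + proc.2.1

-- B's inner backwards scan computes exactly max c (pvT R + s)
theorem pvScan_eq (R : List (Int × Int × Int)) : ∀ (s c : Int),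
    max (pvScan s c R).2 (pvScan s c R).1 = max c (pvT R + s) := by
  induction R with
  | nil => intro s c; simp [pvScan, pvT]
  | cons job R ih =>
      intro s c
      have h := ih (s + job.2.1) (max c (job.1 + (s + job.2.1)))
      simp only [pvScan, List.foldl] at h ⊢
      rw [h]
      simp only [pvT]
      omega

-- so the completion time B computes for proc after prefix R is pvT (proc :: R)
theorem pvScan_comp (R : List (Int × Int × Int)) (proc : Int × Int × Int) :
    max (pvScan proc.2.1 (proc.1 + proc.2.1) R).2 (pvScan proc.2.1 (proc.1 + proc.2.1) R).1
      = pvT (proc :: R) := by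
  rw [pvScan_eq]
  simp only [pvT]
  omega

-- main loop invariant: A's fold from (pvT R, cm) equals B's fold from (cm, R)
theorem pv_main (rest : List (Int × Int × Int)) : ∀ (R : List (Int × Int × Int)) (cm : Int),
    (rest.foldl
      (fun (s : Int × Int) proc =>
        let t := max s.1 proc.1 + proc.2.1
        (t, max s.2 (t + proc.2.2)))
      (pvT R, cm)).2
    = (rest.foldl
        (fun (st : Int × List (Int × Int × Int)) proc =>
          let sc := pvScan proc.2.1 (proc.1 + proc.2.1) st.2
          let c := max sc.2 sc.1
          (max st.1 (c + proc.2.2), proc :: st.2))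
        (cm, R)).1 := by
  induction rest with
  | nil => intro R cm; rfl
  | cons proc rest ih =>
      intro R cm
      simp only [List.foldl]
      rw [pvScan_comp R proc]
      have : max (pvT R) proc.1 + proc.2.1 = pvT (proc :: R) := by simp [pvT]
      rw [this]
      exact ih (proc :: R) (max cm (pvT (proc :: R) + proc.2.2))

-- ===== VERDICT (by name: the statement is the Claim_ definition above) =====
theorem sort123_spec : Claim_equal_sort123 := by
  intro l _
  unfold Spec_sort123 sort123 sort123_alt
  exact pv_main l [] 0
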